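-- pv_equiv track=rewrite | github.com/itsmariah/lista-computabilidade-e-complexidade-de-algoritmos- | 5_AFDBinario.py | afd_binary_string
-- ===== SOURCE A (Python) =====
-- def afd_binary_string(string):
--     state = 0
--
--     for char in string:
--         if state == 0:
--             if char == '0':
--                 state = 1
--             elif char == '1':
--                 state = 2
--             else:
--                 return False
--         elif state == 1:
--             if char not in ('0', '1'):
--                 return False
--
--         elif state == 2:
--             if char not in ('0', '1'):
--                 return False
--
--
--     return (state == 1 and string[-1] == '0') or (state == 2 and string[-1] == '1')
-- ===== SOURCE B (Python) =====
-- def afd_binary_string(string):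
--     return bool(string) and all(c in '01' for c in string) and string[0] == string[-1]
-- ===== Notes on version B (the rewrite author's own statement) =====
-- stated objective: simpler
-- what changed: Replaces the stateful DFA transition loop with a direct one-line predicate: the string is nonempty, every character is a binary digit, and the first character equals the last.
import Mathlib
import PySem

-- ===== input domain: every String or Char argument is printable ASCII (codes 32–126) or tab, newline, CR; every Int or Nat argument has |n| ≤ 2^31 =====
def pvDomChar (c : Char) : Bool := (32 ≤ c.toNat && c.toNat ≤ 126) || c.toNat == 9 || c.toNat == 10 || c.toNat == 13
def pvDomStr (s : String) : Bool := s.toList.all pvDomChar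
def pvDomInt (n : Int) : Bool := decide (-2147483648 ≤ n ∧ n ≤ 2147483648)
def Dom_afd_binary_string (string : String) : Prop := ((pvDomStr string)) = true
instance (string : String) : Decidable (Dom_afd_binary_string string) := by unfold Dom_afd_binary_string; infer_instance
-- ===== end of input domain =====

-- B replaces A's stateful DFA transition loop by a direct predicate (nonempty ∧ all chars binary ∧ first = last); objective: simpler.

-- ===== PORT A =====
-- the for-loop of A: `none` models the early `return False`, `some st` the state after the loop
def afdLoop : List Char → Int → Option Int
  | [], state => some state
  | c :: cs, state =>
    if state == 0 then
      if c == '0' then afdLoop cs 1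
      else if c == '1' then afdLoop cs 2
      else none
    else if state == 1 then
      if !(c == '0' || c == '1') then none else afdLoop cs state
    else if state == 2 then
      if !(c == '0' || c == '1') then none else afdLoop cs state
    else afdLoop cs state

def afd_binary_string (string : String) : Bool :=
  match afdLoop string.toList 0 with
  | none => false
  | some state =>
      (state == 1 && PySem.Str.pyGet? string (-1) == some '0') ||
      (state == 2 && PySem.Str.pyGet? string (-1) == some '1')

-- ===== PORT B =====
def afd_binary_string_alt (string : String) : Bool :=
  !string.toList.isEmpty
    && string.toList.all (fun c => c == '0' || c == '1')
    && PySem.Str.pyGet? string 0 == PySem.Str.pyGet? string (-1)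

-- ===== PRECONDITION & SPEC =====
def Spec_afd_binary_string (string : String) (out : Bool) : Prop := out = afd_binary_string_alt string
instance (string : String) (out : Bool) : Decidable (Spec_afd_binary_string string out) := by unfold Spec_afd_binary_string; infer_instance

-- ===== CLAIM (what is proved, stated in full; the proofs are below) =====
def Claim_equal_afd_binary_string : Prop := ∀ (string : String), Dom_afd_binary_string string → Spec_afd_binary_string string (afd_binary_string string)

-- ===== LEMMAS AND PROOFS =====

theorem afdLoop_run (l : List Char) (st : Int) (h : st = 1 ∨ st = 2) :
    afdLoop l st = if l.all (fun c => c == '0' || c == '1') then some st else none := by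
  induction l with
  | nil => simp [afdLoop]
  | cons c cs ih =>
    rcases h with h | h <;> subst h <;>
      by_cases hc : (c == '0' || c == '1') = true <;>
        simp [afdLoop, hc, ih]

theorem afd_list_eq (l : List Char) :
    (match afdLoop l 0 with
     | none => false
     | some state =>
         (state == 1 && PySem.List.pyGet? l (-1) == some '0') ||
         (state == 2 && PySem.List.pyGet? l (-1) == some '1'))
    = (!l.isEmpty
        && l.all (fun c => c == '0' || c == '1')
        && PySem.List.pyGet? l 0 == PySem.List.pyGet? l (-1)) := by
  cases l with
  | nil => decide
  | cons c cs =>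
    by_cases h0 : c = '0'
    · subst h0
      rw [show afdLoop ('0' :: cs) 0 = afdLoop cs 1 by simp [afdLoop]]
      rw [afdLoop_run cs 1 (Or.inl rfl)]
      by_cases hall : cs.all (fun c => c == '0' || c == '1') = true <;>
        simp [hall, eq_comm]
    · by_cases h1 : c = '1'
      · subst h1
        rw [show afdLoop ('1' :: cs) 0 = afdLoop cs 2 by simp [afdLoop]]
        rw [afdLoop_run cs 2 (Or.inr rfl)]
        by_cases hall : cs.all (fun c => c == '0' || c == '1') = true <;>
          simp [hall, eq_comm]
      · rw [show afdLoop (c :: cs) 0 = none by simp [afdLoop, h0, h1]]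
        simp [h0, h1]

-- ===== VERDICT (by name: the statement is the Claim_ definition above) =====
theorem afd_binary_string_spec : Claim_equal_afd_binary_string := by
  intro s _
  unfold Spec_afd_binary_string afd_binary_string afd_binary_string_alt
  simpa using afd_list_eq s.toList
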